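-- pv_equiv track=rewrite | github.com/thanhhau097/bmga | evaluate_labels_detection.py | filter_x_polygons
-- ===== SOURCE A (Python) =====
-- def filter_x_polygons(polygons, img_height, img_path):
--     # first, draw a line along y axis then count the number of x_label_boxes that intersect with the line
--     max_count = 0
--     max_count_line_y = 0
--
--     for line_y in range(img_height):
--         count = 0
--         for polygon in polygons:
--             if polygon:
--                 min_y = min([x[1] for x in polygon])
--                 max_y = max([x[1] for x in polygon])
--             else:
--                 min_y = 0
--                 max_y = 0
--
--             if min_y <= line_y <= max_y:
--                 count += 1
--         if count > max_count:
--             max_count = count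
--             max_count_line_y = line_y
--
--     # filter out y_label_boxes that intersect with the line
--     filtered_x_label_polygons = []
--     for polygon in polygons:
--         if polygon:
--             min_y = min([x[1] for x in polygon])
--             max_y = max([x[1] for x in polygon])
--         else:
--             min_y = 0
--             max_y = 0
--
--         if min_y <= max_count_line_y <= max_y:
--             filtered_x_label_polygons.append(polygon)
--
--     return filtered_x_label_polygons
-- ===== SOURCE B (Python) =====
-- def _minmax(polygon):
--     ys = [p[1] for p in polygon]
--     return (min(ys), max(ys)) if ys else (0, 0)
--
--
-- def filter_x_polygons(polygons, img_height, img_path):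
--     # Compute each polygon's y-interval once; the best line is attained at an
--     # interval's (clamped) lower end, so scan only those candidate lines.
--     ivs = [_minmax(p) for p in polygons]
--     cands = {0}
--     for lo, _hi in ivs:
--         lo2 = max(lo, 0)
--         if lo2 < img_height:
--             cands.add(lo2)
--     best, max_count = 0, 0
--     for y in sorted(cands):
--         count = sum(1 for lo, hi in ivs if lo <= y <= hi)
--         if count > max_count:
--             max_count, best = count, y
--     return [p for p, (lo, hi) in zip(polygons, ivs) if lo <= best <= hi]
-- ===== Notes on version B (the rewrite author's own statement) =====
-- stated objective: faster
-- what changed: B computes each polygon's y-interval once and scans only the O(N) candidate lines (each interval's clamped lower end, plus 0) instead of testing every one of the img_height lines against every polygon with min/max recomputed per line.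
import Mathlib
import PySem

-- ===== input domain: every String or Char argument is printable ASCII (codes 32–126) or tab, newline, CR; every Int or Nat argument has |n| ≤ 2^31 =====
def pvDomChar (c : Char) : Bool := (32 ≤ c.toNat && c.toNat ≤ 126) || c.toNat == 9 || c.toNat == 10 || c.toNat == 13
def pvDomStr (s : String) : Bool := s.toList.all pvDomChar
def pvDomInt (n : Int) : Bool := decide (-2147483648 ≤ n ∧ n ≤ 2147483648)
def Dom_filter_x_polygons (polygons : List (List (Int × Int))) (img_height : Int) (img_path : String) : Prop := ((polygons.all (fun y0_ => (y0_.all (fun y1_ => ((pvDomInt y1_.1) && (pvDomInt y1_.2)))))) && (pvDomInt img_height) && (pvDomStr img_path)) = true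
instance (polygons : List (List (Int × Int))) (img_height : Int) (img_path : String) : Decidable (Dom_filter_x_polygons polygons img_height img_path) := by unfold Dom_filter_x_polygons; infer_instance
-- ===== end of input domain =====

-- B replaces A's scan of every y-line of the image by a scan of the O(N) candidate
-- lines (each polygon's clamped lower y), with per-polygon y-intervals computed once.

-- ===== PORT A =====
-- shared helper: the min/max-of-second-coordinates computation both Pythons perform
-- (A inlines it in each loop, B's _minmax helper); empty polygon -> (0, 0)
def pvMinMax (polygon : List (Int × Int)) : Int × Int :=
  if polygon = [] then (0, 0)
  else ((PySem.List.min? (polygon.map Prod.snd) (fun y => y)).getD 0,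
        (PySem.List.max? (polygon.map Prod.snd) (fun y => y)).getD 0)

def filter_x_polygons (polygons : List (List (Int × Int))) (img_height : Int) (img_path : String) : List (List (Int × Int)) :=
  let s := (PySem.List.pyRange 0 img_height 1).foldl (fun (s : Int × Int) line_y =>
      let count := polygons.foldl (fun count polygon =>
        let mm := pvMinMax polygon
        if mm.1 ≤ line_y ∧ line_y ≤ mm.2 then count + 1 else count) 0
      if count > s.1 then (count, line_y) else s) (0, 0)
  polygons.foldl (fun acc polygon =>
      let mm := pvMinMax polygon
      if mm.1 ≤ s.2 ∧ s.2 ≤ mm.2 then acc ++ [polygon] else acc) []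

-- ===== PORT B =====
def filter_x_polygons_alt (polygons : List (List (Int × Int))) (img_height : Int) (img_path : String) : List (List (Int × Int)) :=
  let ivs := polygons.map pvMinMax
  let cands := ivs.foldl (fun (s : PySem.Set Int) iv =>
      let lo2 := max iv.1 0
      if lo2 < img_height then PySem.Set.add s lo2 else s) (PySem.Set.ofList [0])
  let s := (PySem.List.sorted cands (fun y => y) false).foldl (fun (s : Int × Int) y =>
      let count : Int := (ivs.countP (fun iv => decide (iv.1 ≤ y ∧ y ≤ iv.2)) : Int)
      if count > s.1 then (count, y) else s) (0, 0)
  ((polygons.zip ivs).filter (fun pi => decide (pi.2.1 ≤ s.2 ∧ s.2 ≤ pi.2.2))).map Prod.fst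

-- ===== PRECONDITION & SPEC =====
def Spec_filter_x_polygons (polygons : List (List (Int × Int))) (img_height : Int) (img_path : String) (out : List (List (Int × Int))) : Prop := out = filter_x_polygons_alt polygons img_height img_path
instance (polygons : List (List (Int × Int))) (img_height : Int) (img_path : String) (out : List (List (Int × Int))) : Decidable (Spec_filter_x_polygons polygons img_height img_path out) := by unfold Spec_filter_x_polygons; infer_instance

-- ===== CLAIM (what is proved, stated in full; the proofs are below) =====
def Claim_equal_filter_x_polygons : Prop := ∀ (polygons : List (List (Int × Int))) (img_height : Int) (img_path : String), Dom_filter_x_polygons polygons img_height img_path → Spec_filter_x_polygons polygons img_height img_path (filter_x_polygons polygons img_height img_path)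

-- ===== LEMMAS AND PROOFS =====

-- the per-line count both programs compute, as a function of the interval list
def pvCnt (ivs : List (Int × Int)) (y : Int) : Int :=
  (ivs.countP (fun iv => decide (iv.1 ≤ y ∧ y ≤ iv.2)) : Int)

-- B's candidate set
def pvCands (ivs : List (Int × Int)) (H : Int) : PySem.Set Int :=
  ivs.foldl (fun (s : PySem.Set Int) iv =>
      if max iv.1 0 < H then PySem.Set.add s (max iv.1 0) else s) (PySem.Set.ofList [0])

-- running max over f-values: value, bounds, attainment
lemma maxfold_ge (f : Int → Int) (ys : List Int) (m : Int) :
    m ≤ ys.foldl (fun a y => max a (f y)) m ∧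
    ∀ y ∈ ys, f y ≤ ys.foldl (fun a y => max a (f y)) m :=
  PySem.List.le_foldl_max_int ys f m

lemma maxfold_attained (f : Int → Int) (ys : List Int) (m : Int) :
    ys.foldl (fun a y => max a (f y)) m = m ∨
    ∃ y ∈ ys, f y = ys.foldl (fun a y => max a (f y)) m := by
  induction ys generalizing m with
  | nil => exact Or.inl rfl
  | cons y t ih =>
    rcases ih (max m (f y)) with h | ⟨z, hz, hfz⟩
    · simp only [List.foldl_cons, h]
      rcases le_or_gt (f y) m with h1 | h1
      · exact Or.inl (by omega)
      · exact Or.inr ⟨y, by simp, by omega⟩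
    · exact Or.inr ⟨z, by simp [hz], by simpa using hfz⟩

-- the argmax loop both programs run, characterised
lemma argmaxChar (f : Int → Int) (ys : List Int) (m b : Int) :
    ys.foldl (fun (s : Int × Int) y => if f y > s.1 then (f y, y) else s) (m, b)
    = (ys.foldl (fun a y => max a (f y)) m,
       if m < ys.foldl (fun a y => max a (f y)) m
       then (ys.find? (fun y => f y == ys.foldl (fun a y => max a (f y)) m)).getD b
       else b) := by
  induction ys generalizing m b with
  | nil => simp
  | cons y t ih =>
    by_cases hy : f y > m
    · have hm : max m (f y) = f y := by omega
      simp only [List.foldl_cons, if_pos hy, ih (f y) y, hm]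
      have hle : f y ≤ t.foldl (fun a y => max a (f y)) (f y) := (maxfold_ge f t (f y)).1
      have hlt : m < t.foldl (fun a y => max a (f y)) (f y) := by omega
      rw [if_pos hlt]
      by_cases he : f y = t.foldl (fun a y => max a (f y)) (f y)
      · rw [if_neg (by omega)]
        rw [List.find?_cons_of_pos (by simpa using he)]
        simp
      · rw [if_pos (by omega)]
        rw [List.find?_cons_of_neg (by simpa using he)]
        rcases maxfold_attained f t (f y) with h | ⟨z, hz, hfz⟩
        · omega
        · have : (t.find? (fun y_1 => f y_1 == t.foldl (fun a y => max a (f y)) (f y))).isSome := by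
            rw [List.find?_isSome]
            exact ⟨z, hz, by simpa using hfz⟩
          rcases Option.isSome_iff_exists.mp this with ⟨w, hw⟩
          simp [hw]
    · have hm : max m (f y) = m := by omega
      simp only [List.foldl_cons, if_neg hy, hm, ih m b]
      by_cases hlt : m < t.foldl (fun a y => max a (f y)) m
      · rw [if_pos hlt, if_pos hlt,
          List.find?_cons_of_neg (by simp; omega)]
      · rw [if_neg hlt, if_neg hlt]

-- find? on a strictly sorted list returns the minimum satisfying element
lemma find?_min {p : Int → Bool} {l : List Int} (hs : l.Pairwise (· < ·)) {w : Int}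
    (hw : l.find? p = some w) : ∀ z ∈ l, p z → w ≤ z := by
  induction l with
  | nil => simp at hw
  | cons x t ih =>
    by_cases hx : p x
    · rw [List.find?_cons_of_pos hx] at hw
      obtain rfl : x = w := by simpa using hw
      intro z hz _
      rcases List.mem_cons.mp hz with rfl | hz
      · exact le_refl _
      · exact le_of_lt ((List.pairwise_cons.mp hs).1 z hz)
    · rw [List.find?_cons_of_neg hx] at hw
      intro z hz hpz
      rcases List.mem_cons.mp hz with rfl | hz
      · exact absurd hpz (by simp [hx])
      · exact ih (List.pairwise_cons.mp hs).2 hw z hz hpz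

-- membership in B's candidate set
lemma mem_pvCands (ivs : List (Int × Int)) (H y : Int) :
    y ∈ pvCands ivs H ↔ y = 0 ∨ ∃ iv ∈ ivs, max iv.1 0 < H ∧ y = max iv.1 0 := by
  unfold pvCands
  have gen : ∀ (s : PySem.Set Int),
      y ∈ ivs.foldl (fun (s : PySem.Set Int) iv =>
        if max iv.1 0 < H then PySem.Set.add s (max iv.1 0) else s) s
      ↔ y ∈ s ∨ ∃ iv ∈ ivs, max iv.1 0 < H ∧ y = max iv.1 0 := by
    induction ivs with
    | nil => simp
    | cons iv t ih =>
      intro s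
      simp only [List.foldl_cons]
      by_cases h : max iv.1 0 < H
      · rw [if_pos h, ih, PySem.Set.mem_add]
        constructor
        · rintro ((hs | rfl) | ⟨z, hz, hzH, rfl⟩)
          · exact Or.inl hs
          · exact Or.inr ⟨iv, List.mem_cons_self, h, rfl⟩
          · exact Or.inr ⟨z, List.mem_cons_of_mem _ hz, hzH, rfl⟩
        · rintro (hs | ⟨z, hz, hzH, rfl⟩)
          · exact Or.inl (Or.inl hs)
          · rcases List.mem_cons.mp hz with rfl | hz
            · exact Or.inl (Or.inr rfl)
            · exact Or.inr ⟨z, hz, hzH, rfl⟩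
      · rw [if_neg h, ih]
        constructor
        · rintro (hs | ⟨z, hz, hzH, rfl⟩)
          · exact Or.inl hs
          · exact Or.inr ⟨z, List.mem_cons_of_mem _ hz, hzH, rfl⟩
        · rintro (hs | ⟨z, hz, hzH, rfl⟩)
          · exact Or.inl hs
          · rcases List.mem_cons.mp hz with rfl | hz
            · exact absurd hzH h
            · exact Or.inr ⟨z, hz, hzH, rfl⟩
  rw [gen]
  simp [PySem.Set.mem_ofList]

lemma nodup_pvCands (ivs : List (Int × Int)) (H : Int) : (pvCands ivs H).Nodup := by
  unfold pvCands
  have gen : ∀ (s : PySem.Set Int), s.Nodup →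
      (ivs.foldl (fun (s : PySem.Set Int) iv =>
        if max iv.1 0 < H then PySem.Set.add s (max iv.1 0) else s) s).Nodup := by
    induction ivs with
    | nil => exact fun s h => h
    | cons iv t ih =>
      intro s hs
      simp only [List.foldl_cons]
      by_cases h : max iv.1 0 < H
      · rw [if_pos h]; exact ih _ (PySem.Set.nodup_add s _ hs)
      · rw [if_neg h]; exact ih _ hs
  exact gen _ (PySem.Set.nodup_ofList [0])

-- the star lemma: every line y ≥ 0 is dominated by a candidate ≤ y
lemma star (ivs : List (Int × Int)) (H y : Int) (hy0 : 0 ≤ y) (hyH : y < H) :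
    ∃ z ∈ pvCands ivs H, z ≤ y ∧ pvCnt ivs y ≤ pvCnt ivs z := by
  classical
  set C := pvCands ivs H with hC
  set F := C.filter (fun c => decide (c ≤ y)) with hF
  set z := F.foldl max 0 with hz
  have h0C : (0 : Int) ∈ C := by rw [hC, mem_pvCands]; exact Or.inl rfl
  have h0F : (0 : Int) ∈ F := by rw [hF]; simp [h0C, hy0]
  have hzy : z ≤ y := by
    rcases PySem.List.foldl_max_mem F 0 with h | h
    · rw [hz, h]; exact hy0
    · have := List.mem_filter.mp (hz ▸ h)
      simpa using this.2
  have hzC : z ∈ C := by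
    rcases PySem.List.foldl_max_mem F 0 with h | h
    · rw [hz, h]; exact h0C
    · exact (List.mem_filter.mp (hz ▸ h)).1
  refine ⟨z, hzC, hzy, ?_⟩
  unfold pvCnt
  have : ivs.countP (fun iv => decide (iv.1 ≤ y ∧ y ≤ iv.2))
       ≤ ivs.countP (fun iv => decide (iv.1 ≤ z ∧ z ≤ iv.2)) := by
    apply List.countP_mono_left
    intro iv hiv hp
    have hp' : iv.1 ≤ y ∧ y ≤ iv.2 := by simpa using hp
    have hcand : max iv.1 0 ∈ C := by
      rw [hC, mem_pvCands]
      exact Or.inr ⟨iv, hiv, by omega, rfl⟩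
    have hcF : max iv.1 0 ∈ F := by
      rw [hF]; exact List.mem_filter.mpr ⟨hcand, by simp; omega⟩
    have hcz : max iv.1 0 ≤ z := (PySem.List.le_foldl_max F 0).2 _ hcF
    simp only [decide_eq_true_eq]
    omega
  exact_mod_cast this

-- the core: A's argmax over all lines = B's argmax over sorted candidates
lemma best_eq (ivs : List (Int × Int)) (H : Int) :
    ((PySem.List.pyRange 0 H 1).foldl
        (fun (s : Int × Int) y => if pvCnt ivs y > s.1 then (pvCnt ivs y, y) else s) (0, 0)).2
    = ((PySem.List.sorted (pvCands ivs H) (fun y => y) false).foldl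
        (fun (s : Int × Int) y => if pvCnt ivs y > s.1 then (pvCnt ivs y, y) else s) (0, 0)).2 := by
  by_cases hH : 0 < H
  · -- positive height: compare the two argmax loops
    rw [argmaxChar, argmaxChar]
    have memC : ∀ y : Int, y ∈ PySem.List.sorted (pvCands ivs H) (fun y => y) false ↔ y ∈ pvCands ivs H := by
      intro y; exact PySem.List.mem_sorted (pvCands ivs H) (fun y => y) false y
    have hCnodup : (PySem.List.sorted (pvCands ivs H) (fun y => y) false).Nodup :=
      (PySem.List.sorted_perm (pvCands ivs H) (fun y => y) false).nodup_iff.mpr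
        (nodup_pvCands ivs H)
    have hCsorted : (PySem.List.sorted (pvCands ivs H) (fun y => y) false).Pairwise (· < ·) := by
      have hle : (PySem.List.sorted (pvCands ivs H) (fun y => y) false).Pairwise (· ≤ ·) :=
        PySem.List.sorted_pairwise (pvCands ivs H) (fun y => y)
      exact (hle.and hCnodup).imp (fun h => lt_of_le_of_ne h.1 h.2)
    have memR : ∀ y : Int, y ∈ PySem.List.pyRange 0 H 1 ↔ 0 ≤ y ∧ y < H := by
      intro y; rw [PySem.List.mem_pyRange_one]
    have candR : ∀ y : Int, y ∈ pvCands ivs H → y ∈ PySem.List.pyRange 0 H 1 := by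
      intro y hy
      rcases (mem_pvCands ivs H y).mp hy with rfl | ⟨iv, _, hlt, rfl⟩
      · exact (memR 0).mpr ⟨le_refl _, hH⟩
      · exact (memR _).mpr ⟨le_max_right _ _, hlt⟩
    set f := pvCnt ivs with hf
    set R := PySem.List.pyRange 0 H 1 with hR
    set C := PySem.List.sorted (pvCands ivs H) (fun y => y) false with hC
    have boundsR := maxfold_ge f R 0
    have boundsC := maxfold_ge f C 0
    have hM : R.foldl (fun a y => max a (f y)) 0 = C.foldl (fun a y => max a (f y)) 0 := by
      apply le_antisymm
      · rcases maxfold_attained f R 0 with h | ⟨y, hy, hfy⟩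
        · rw [h]; exact boundsC.1
        · rw [← hfy]
          obtain ⟨hy0, hyH⟩ := (memR y).mp hy
          obtain ⟨z, hz, _, hfz⟩ := star ivs H y hy0 hyH
          exact le_trans hfz (boundsC.2 z ((memC z).mpr hz))
      · rcases maxfold_attained f C 0 with h | ⟨y, hy, hfy⟩
        · rw [h]; exact boundsR.1
        · rw [← hfy]
          exact boundsR.2 y (candR y ((memC y).mp hy))
    rw [← hM]
    by_cases hpos : (0 : Int) < R.foldl (fun a y => max a (f y)) 0
    · rw [if_pos hpos, if_pos hpos]
      set M := R.foldl (fun a y => max a (f y)) 0 with hMdef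
      have attR : ∃ y ∈ R, f y = M := by
        rcases maxfold_attained f R 0 with h | h
        · rw [← hMdef] at h; omega
        · exact h
      have attC : ∃ y ∈ C, f y = M := by
        rcases maxfold_attained f C 0 with h | h
        · rw [← hM] at h; omega
        · rw [← hM] at h; exact h
      obtain ⟨wR, hwR⟩ := Option.isSome_iff_exists.mp (by
        rw [List.find?_isSome]
        obtain ⟨y, hy, hfy⟩ := attR
        exact ⟨y, hy, by simpa using hfy⟩ :
        (R.find? (fun y => f y == M)).isSome)
      obtain ⟨wC, hwC⟩ := Option.isSome_iff_exists.mp (by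
        rw [List.find?_isSome]
        obtain ⟨y, hy, hfy⟩ := attC
        exact ⟨y, hy, by simpa using hfy⟩ :
        (C.find? (fun y => f y == M)).isSome)
      have hwRmem := List.mem_of_find?_eq_some hwR
      have hwCmem := List.mem_of_find?_eq_some hwC
      have hfwR : f wR = M := by simpa using List.find?_some hwR
      have hfwC : f wC = M := by simpa using List.find?_some hwC
      have hRsorted : R.Pairwise (· < ·) := PySem.List.pairwise_lt_pyRange_one 0 H
      have h1 : wR ≤ wC :=
        find?_min hRsorted hwR wC (candR wC ((memC wC).mp hwCmem)) (by simpa using hfwC)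
      have h2 : wC ≤ wR := by
        obtain ⟨hw0, hwH⟩ := (memR wR).mp hwRmem
        obtain ⟨z, hz, hzle, hfz⟩ := star ivs H wR hw0 hwH
        have hfzM : f z = M := by
          have h3 := boundsR.2 z (candR z hz)
          have h4 : f wR ≤ f z := hfz
          omega
        exact le_trans (find?_min hCsorted hwC z ((memC z).mpr hz) (by simpa using hfzM)) hzle
      have : wR = wC := le_antisymm h1 h2
      rw [hwR, hwC, this]
    · rw [if_neg hpos, if_neg hpos]
  · -- non-positive height: A's loop is empty, B's candidate set is {0}
    have hH2 : H ≤ 0 := by omega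
    rw [PySem.List.pyRange_one_eq_nil (by omega)]
    have hc : pvCands ivs H = [0] := by
      unfold pvCands
      rw [PySem.List.foldl_congr_mem ivs _ (fun s _ => s) _
        (by intro acc iv hiv
            rw [if_neg (by have := le_max_right iv.1 (0 : Int); omega)]),
        PySem.List.foldl_ignore]
      rfl
    rw [hc]
    have hs : PySem.List.sorted ([0] : List Int) (fun y => y) false = [0] := rfl
    rw [hs]
    simp only [List.foldl_cons, List.foldl_nil]
    by_cases h0 : pvCnt ivs 0 > 0
    · rw [if_pos h0]
    · rw [if_neg h0]

-- A's inner counting loop computes pvCnt of the interval list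
lemma innerA (polygons : List (List (Int × Int))) (y : Int) :
    polygons.foldl (fun count polygon =>
        if (pvMinMax polygon).1 ≤ y ∧ y ≤ (pvMinMax polygon).2 then count + 1 else count) 0
    = pvCnt (polygons.map pvMinMax) y := by
  rw [PySem.List.foldl_ite_add_one]
  simp [pvCnt, List.countP_map, Function.comp_def]

-- B's zip-filter-map equals A's filter over polygons
lemma zipfilter (polygons : List (List (Int × Int))) (b : Int) :
    (((polygons.zip (polygons.map pvMinMax)).filter
        (fun pi => decide (pi.2.1 ≤ b ∧ b ≤ pi.2.2))).map Prod.fst)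
    = polygons.filter (fun p => decide ((pvMinMax p).1 ≤ b ∧ b ≤ (pvMinMax p).2)) := by
  induction polygons with
  | nil => rfl
  | cons p t ih =>
    simp only [List.map_cons, List.zip_cons_cons, List.filter_cons]
    by_cases h : (pvMinMax p).1 ≤ b ∧ b ≤ (pvMinMax p).2
    · rw [if_pos (by simpa using h), if_pos (by simpa using h), List.map_cons, ih]
    · rw [if_neg (by simpa using h), if_neg (by simpa using h), ih]

lemma pvCnt_fold (ivs : List (Int × Int)) (y : Int) :
    (ivs.countP (fun iv => decide (iv.1 ≤ y ∧ y ≤ iv.2)) : Int) = pvCnt ivs y := rfl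

lemma pvCands_fold (ivs : List (Int × Int)) (H : Int) :
    ivs.foldl (fun (s : PySem.Set Int) iv =>
      if max iv.1 0 < H then PySem.Set.add s (max iv.1 0) else s) (PySem.Set.ofList [0])
    = pvCands ivs H := rfl

-- ===== VERDICT (by name: the statement is the Claim_ definition above) =====
theorem filter_x_polygons_spec : Claim_equal_filter_x_polygons := by
  intro polygons img_height img_path _
  unfold Spec_filter_x_polygons filter_x_polygons filter_x_polygons_alt
  simp only [innerA, pvCnt_fold, pvCands_fold]
  rw [best_eq (polygons.map pvMinMax) img_height]
  rw [PySem.List.foldl_append_ite_eq_filter, zipfilter]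
  simp only [List.nil_append]
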